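-- pv_equiv track=rewrite | github.com/Dany0343/TeoriaDeLaComputacion | P6/P6.py | validacionDeCadena
-- ===== SOURCE A (Python) =====
-- def validacionDeCadena(cadena):
--     counterizq = 0
--     counterder = 0
--     longitudCadena = len(cadena) - 1 #Se le resta uno debido al caracter que ayudará a saber si la cadena ha terminado
--     longitudCadenaMitad = (len(cadena) // 2)
--     #Revisa el lado izquierda para ver si solo hay 0's
--     for i in range(0 , longitudCadenaMitad):
--         if cadena[i] != '0':
--             counterizq = counterizq + 1
--             break
--
--     #Revisa el lado izquierda para ver si solo hay 1's
--     i = 0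
--     for i in range(longitudCadenaMitad, longitudCadena):
--         if cadena[i] != '1':
--             counterder = counterder + 1
--             break
--
--     if counterizq == 0 and counterder == 0:
--         return True
--     else:
--         return False
-- ===== SOURCE B (Python) =====
-- def validacionDeCadena(cadena):
--     mitad = len(cadena) // 2
--     return (cadena[:mitad] == '0' * mitad
--             and cadena[mitad:len(cadena) - 1] == '1' * (len(cadena) - 1 - mitad))
-- ===== Notes on version B (the rewrite author's own statement) =====
-- stated objective: simpler
-- what changed: Replaces the two index loops with break-counters by two whole-slice comparisons against constructed '0'*mitad and '1'*(len-1-mitad) patterns (the final sentinel character stays ignored).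
import Mathlib
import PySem

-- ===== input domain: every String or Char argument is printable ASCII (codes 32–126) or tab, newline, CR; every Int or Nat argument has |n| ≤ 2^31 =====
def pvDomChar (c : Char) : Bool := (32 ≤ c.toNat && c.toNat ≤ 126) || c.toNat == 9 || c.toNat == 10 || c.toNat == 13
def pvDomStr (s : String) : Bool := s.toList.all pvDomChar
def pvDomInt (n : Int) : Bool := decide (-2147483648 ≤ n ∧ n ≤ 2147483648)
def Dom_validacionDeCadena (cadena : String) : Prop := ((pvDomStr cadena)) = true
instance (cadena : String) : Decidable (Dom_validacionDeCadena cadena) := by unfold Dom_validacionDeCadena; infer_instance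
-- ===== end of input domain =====

-- B replaces A's two index loops with break-counters by two whole-slice comparisons
-- against constructed all-'0' / all-'1' patterns; same O(n) cost, simpler.

-- ===== PORT A =====
-- one of A's 'for i in range(…): if cadena[i] != t: counter += 1; break' loops:
-- walks the index range, returns the counter (1 at the first mismatch, else 0).
-- cadena[i]: every index produced by A's ranges is in range, so pyGet? is always
-- some here; the none branch (Python's IndexError) is unreachable.
def pvScanA (cs : List Char) (t : Char) : List Int → Int
  | [] => 0
  | i :: rest =>
    match PySem.List.pyGet? cs i with
    | some c => if c ≠ t then 0 + 1 else pvScanA cs t rest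
    | none => 0 + 1

def validacionDeCadena (cadena : String) : Bool :=
  let cs := cadena.toList
  let longitudCadena : Int := PySem.Str.len cadena - 1
  let longitudCadenaMitad : Int := PySem.Int.floordiv (PySem.Str.len cadena) 2
  let counterizq : Int := pvScanA cs '0' (PySem.List.pyRange 0 longitudCadenaMitad 1)
  let counterder : Int := pvScanA cs '1' (PySem.List.pyRange longitudCadenaMitad longitudCadena 1)
  if counterizq = 0 ∧ counterder = 0 then true else false

-- ===== PORT B =====
def validacionDeCadena_alt (cadena : String) : Bool :=
  let cs := cadena.toList
  let n : Int := PySem.Str.len cadena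
  let mitad : Int := PySem.Int.floordiv n 2
  (PySem.List.slice cs none (some mitad) == List.replicate mitad.toNat '0') &&
  (PySem.List.slice cs (some mitad) (some (n - 1)) == List.replicate (n - 1 - mitad).toNat '1')

-- ===== PRECONDITION & SPEC =====
def Spec_validacionDeCadena (cadena : String) (out : Bool) : Prop := out = validacionDeCadena_alt cadena
instance (cadena : String) (out : Bool) : Decidable (Spec_validacionDeCadena cadena out) := by unfold Spec_validacionDeCadena; infer_instance

-- ===== CLAIM (what is proved, stated in full; the proofs are below) =====
def Claim_equal_validacionDeCadena : Prop := ∀ (cadena : String), Dom_validacionDeCadena cadena → Spec_validacionDeCadena cadena (validacionDeCadena cadena)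

-- ===== LEMMAS AND PROOFS =====

-- A's scan over range(a,b) returns 0 iff the corresponding segment of cs is all t.
theorem pvScanA_eq_zero_iff (cs : List Char) (t : Char) (a b : Nat) (hb : b ≤ cs.length) :
    (pvScanA cs t (PySem.List.pyRange (a : Int) (b : Int) 1) = 0) ↔
      (cs.drop a).take (b - a) = List.replicate (b - a) t := by
  by_cases hab : b ≤ a
  · rw [PySem.List.pyRange_one_eq_nil (by exact_mod_cast hab)]
    simp [pvScanA, Nat.sub_eq_zero_of_le hab]
  · replace hab : a < b := by omega
    have ha : a < cs.length := lt_of_lt_of_le hab hb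
    rw [PySem.List.pyRange_one_cons (by exact_mod_cast hab)]
    have : ((a : Int) + 1) = ((a + 1 : Nat) : Int) := by push_cast; ring
    rw [this]
    have hih := pvScanA_eq_zero_iff cs t (a + 1) b hb
    have hdrop : cs.drop a = cs[a] :: cs.drop (a + 1) := List.drop_eq_getElem_cons ha
    have hget : PySem.List.pyGet? cs (a : Int) = some cs[a] := by
      rw [PySem.List.pyGet?_natCast]; exact List.getElem?_eq_getElem ha
    have hba : b - a = (b - (a + 1)) + 1 := by omega
    simp only [pvScanA, hget]
    by_cases hc : cs[a] = t
    · simp only [hc, ne_eq, not_true_eq_false, if_false, hih, hdrop, hba,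
        List.take_succ_cons, List.replicate_succ, List.cons.injEq, true_and]
    · simp only [ne_eq, hc, not_false_eq_true, if_true]
      constructor
      · intro h; omega
      · intro heq
        rw [hdrop, hba, List.take_succ_cons, List.replicate_succ] at heq
        exact absurd (List.cons.injEq _ _ _ _ ▸ heq).1 hc
termination_by b - a

-- the full statement, over the character list
theorem pvMain (cs : List Char) :
    (if pvScanA cs '0' (PySem.List.pyRange 0 (PySem.Int.floordiv (cs.length : Int) 2) 1) = 0 ∧
        pvScanA cs '1' (PySem.List.pyRange (PySem.Int.floordiv (cs.length : Int) 2) ((cs.length : Int) - 1) 1) = 0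
      then true else false) =
    ((PySem.List.slice cs none (some (PySem.Int.floordiv (cs.length : Int) 2)) ==
        List.replicate (PySem.Int.floordiv (cs.length : Int) 2).toNat '0') &&
      (PySem.List.slice cs (some (PySem.Int.floordiv (cs.length : Int) 2)) (some ((cs.length : Int) - 1)) ==
        List.replicate ((cs.length : Int) - 1 - PySem.Int.floordiv (cs.length : Int) 2).toNat '1')) := by
  by_cases h0 : cs = []
  · subst h0; decide
  · have hlen : cs.length ≠ 0 := by simpa using h0
    have hmid : PySem.Int.floordiv (cs.length : Int) 2 = ((cs.length / 2 : Nat) : Int) := by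
      exact_mod_cast PySem.Int.floordiv_natCast cs.length 2
    have hsub : ((cs.length : Int) - 1) = ((cs.length - 1 : Nat) : Int) := by omega
    rw [hmid, hsub]
    have hL := pvScanA_eq_zero_iff cs '0' 0 (cs.length / 2) (by omega)
    have hR := pvScanA_eq_zero_iff cs '1' (cs.length / 2) (cs.length - 1) (by omega)
    rw [show ((0:Nat) : Int) = (0 : Int) from rfl] at hL
    simp only [List.drop_zero, Nat.sub_zero] at hL
    have hsliceL : PySem.List.slice cs none (some ((cs.length / 2 : Nat) : Int)) = cs.take (cs.length / 2) := by
      rw [PySem.List.slice_to cs (by positivity), Int.toNat_natCast]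
    have hsliceR : PySem.List.slice cs (some ((cs.length / 2 : Nat) : Int)) (some ((cs.length - 1 : Nat) : Int)) =
        (cs.drop (cs.length / 2)).take ((cs.length - 1) - cs.length / 2) := by
      rw [PySem.List.slice_toNat cs (by positivity) (by positivity), Int.toNat_natCast, Int.toNat_natCast]
    have hnat2 : ((cs.length - 1 : Nat) : Int) - ((cs.length / 2 : Nat) : Int)
        = (((cs.length - 1) - cs.length / 2 : Nat) : Int) := by
      have := Nat.div_le_self cs.length 2; omega
    rw [hsliceL, hsliceR, hnat2, Int.toNat_natCast, Int.toNat_natCast]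
    split_ifs with h
    · obtain ⟨hl, hr⟩ := h
      rw [hL] at hl; rw [hR] at hr
      simp [hl, hr]
    · rw [not_and_or] at h
      rcases h with h | h
      · rw [hL] at h; simp [h]
      · rw [hR] at h; simp [h]

-- ===== VERDICT (by name: the statement is the Claim_ definition above) =====
theorem validacionDeCadena_spec : Claim_equal_validacionDeCadena := by
  intro cadena _
  unfold Spec_validacionDeCadena validacionDeCadena validacionDeCadena_alt
  simp only [PySem.Str.len_eq]
  exact pvMain cadena.toList
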